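-- pv_equiv track=rewrite | github.com/glm1024/babel | src/zh_audit/properties_file.py | _find_separator_index
-- ===== SOURCE A (Python) =====
-- def _find_separator_index(line):
--     escaped = False
--     for index, char in enumerate(line):
--         if escaped:
--             escaped = False
--             continue
--         if char == "\\":
--             escaped = True
--             continue
--         if char in ("=", ":"):
--             return index
--     return -1
-- ===== SOURCE B (Python) =====
-- def _find_separator_index(line):
--     # Two staged passes: list all separator positions, then return the first
--     # one whose preceding maximal backslash run has even length (a character
--     # is escaped exactly when that run length is odd).
--     candidates = [i for i, ch in enumerate(line) if ch in "=:"]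
--     for i in candidates:
--         j = i
--         while j > 0 and line[j - 1] == "\\":
--             j -= 1
--         if (i - j) % 2 == 0:
--             return i
--     return -1
-- ===== Notes on version B (the rewrite author's own statement) =====
-- stated objective: alternative
-- what changed: Replaces the stateful escaped-flag scan with two staged passes: first collect all separator positions, then return the first whose preceding maximal backslash run has even length.
import Mathlib
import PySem

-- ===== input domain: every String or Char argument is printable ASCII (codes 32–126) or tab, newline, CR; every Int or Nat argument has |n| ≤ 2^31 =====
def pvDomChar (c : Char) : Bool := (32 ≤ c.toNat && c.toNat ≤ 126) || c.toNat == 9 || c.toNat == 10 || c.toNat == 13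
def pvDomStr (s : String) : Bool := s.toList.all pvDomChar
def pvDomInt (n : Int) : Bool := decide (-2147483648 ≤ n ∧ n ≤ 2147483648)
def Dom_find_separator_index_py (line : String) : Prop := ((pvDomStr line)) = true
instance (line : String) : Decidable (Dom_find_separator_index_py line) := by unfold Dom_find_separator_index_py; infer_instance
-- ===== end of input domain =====

-- B differs from A in structure only (staged candidate list vs stateful scan); same value everywhere.

-- ===== PORT A =====
-- Transliteration of A: the for-loop over enumerate(line) with the `escaped` flag.
def pvGoA : List Char → Bool → Nat → Int
  | [], _, _ => -1
  | c :: rest, escaped, index =>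
    if escaped then pvGoA rest false (index + 1)
    else if c = '\\' then pvGoA rest true (index + 1)
    else if c = '=' ∨ c = ':' then (index : Int)
    else pvGoA rest false (index + 1)

def find_separator_index_py (line : String) : Int := pvGoA line.toList false 0

-- ===== PORT B =====
-- Stage 1 of B: the comprehension collecting the indices of separator characters.
def pvCands : List Char → Nat → List Nat
  | [], _ => []
  | c :: rest, i =>
    if c = '=' ∨ c = ':' then i :: pvCands rest (i + 1) else pvCands rest (i + 1)

-- B's inner while-loop: walk j down over the backslash run ending just before position j.
def pvLoopJ (l : List Char) : Nat → Nat
  | 0 => 0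
  | j + 1 => if l.getD j ' ' = '\\' then pvLoopJ l j else j + 1

-- Stage 2 of B: first candidate whose preceding backslash run (i - j) has even length.
def pvScanB (l : List Char) : List Nat → Int
  | [] => -1
  | i :: rest => if (i - pvLoopJ l i) % 2 = 0 then (i : Int) else pvScanB l rest

def find_separator_index_py_alt (line : String) : Int :=
  pvScanB line.toList (pvCands line.toList 0)

-- ===== PRECONDITION & SPEC =====
def Spec_find_separator_index_py (line : String) (out : Int) : Prop := out = find_separator_index_py_alt line
instance (line : String) (out : Int) : Decidable (Spec_find_separator_index_py line out) := by unfold Spec_find_separator_index_py; infer_instance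

-- ===== CLAIM (what is proved, stated in full; the proofs are below) =====
def Claim_equal_find_separator_index_py : Prop := ∀ (line : String), Dom_find_separator_index_py line → Spec_find_separator_index_py line (find_separator_index_py line)

-- ===== LEMMAS AND PROOFS =====

-- A's escaped flag at absolute position i, expressed via B's run-start function.
def pvEsc (l : List Char) (i : Nat) : Bool := (i - pvLoopJ l i) % 2 = 1

theorem pvLoopJ_le (l : List Char) : ∀ i, pvLoopJ l i ≤ i := by
  intro i
  induction i with
  | zero => simp [pvLoopJ]
  | succ j ih =>
    simp only [pvLoopJ]
    split
    · omega
    · omega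

theorem pvEsc_succ (l : List Char) (i : Nat) :
    pvEsc l (i + 1) = (l.getD i ' ' = '\\' && !pvEsc l i) := by
  have hle := pvLoopJ_le l i
  simp only [List.getD]
  by_cases hc : l[i]?.getD ' ' = '\\'
  · have hJ : pvLoopJ l (i + 1) = pvLoopJ l i := by
      simp [pvLoopJ, List.getD, hc]
    simp only [pvEsc, hJ, hc]
    rcases Nat.even_or_odd (i - pvLoopJ l i) with h | h
    · rw [Nat.even_iff] at h
      have h1 : (i + 1 - pvLoopJ l i) % 2 = 1 := by omega
      have h2 : ¬ (i - pvLoopJ l i) % 2 = 1 := by omega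
      simp [h1, h2]
    · rw [Nat.odd_iff] at h
      have h1 : ¬ (i + 1 - pvLoopJ l i) % 2 = 1 := by omega
      simp [h1, h]
  · have hJ : pvLoopJ l (i + 1) = i + 1 := by
      simp [pvLoopJ, List.getD, hc]
    simp [pvEsc, hJ, hc]

theorem pvMain : ∀ (s : List Char) (l : List Char) (i : Nat), l.drop i = s →
    pvGoA s (pvEsc l i) i = pvScanB l (pvCands s i) := by
  intro s
  induction s with
  | nil => intro l i h; simp [pvGoA, pvCands, pvScanB]
  | cons c rest ih =>
    intro l i h
    have hget : l[i]? = some c := by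
      have h0 : (List.drop i l)[0]? = some c := by rw [h]; rfl
      rw [List.getElem?_drop] at h0
      simpa using h0
    have hgetD : l.getD i ' ' = c := by simp [List.getD, hget]
    have hdrop : l.drop (i + 1) = rest := by
      have : l.drop (i + 1) = (l.drop i).drop 1 := by
        rw [List.drop_drop]
      rw [this, h]; rfl
    have hsucc := pvEsc_succ l i
    rw [hgetD] at hsucc
    by_cases he : pvEsc l i = true
    · -- escaped: A consumes c; B skips the candidate (run is odd) or has no candidate here
      have hnext : pvEsc l (i + 1) = false := by
        rw [hsucc, he]; simp
      rw [pvGoA]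
      simp only [he, if_true]
      rw [← hnext, ih l (i + 1) hdrop]
      simp only [pvCands]
      split
      · -- c is a separator: candidate i present but its run is odd
        rw [pvScanB]
        have : ¬ (i - pvLoopJ l i) % 2 = 0 := by
          simp only [pvEsc, decide_eq_true_eq] at he; omega
        simp [this]
      · rfl
    · have he' : pvEsc l i = false := by simpa using he
      rw [pvGoA]
      simp only [he', if_false, Bool.false_eq_true]
      by_cases hb : c = '\\'
      · have hnext : pvEsc l (i + 1) = true := by rw [hsucc, he', hb]; simp
        simp only [hb, if_true]
        rw [← hnext, ih l (i + 1) hdrop]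
        have : ¬('\\' = '=' ∨ '\\' = ':') := by decide
        simp [pvCands]
      · simp only [hb, if_false]
        by_cases hs : c = '=' ∨ c = ':'
        · -- unescaped separator: both return i
          simp only [hs, if_true]
          have : (i - pvLoopJ l i) % 2 = 0 := by
            simp only [pvEsc, decide_eq_false_iff_not] at he'
            have := pvLoopJ_le l i; omega
          simp [pvCands, hs, pvScanB, this]
        · have hnext : pvEsc l (i + 1) = false := by rw [hsucc]; simp [hb]
          simp only [hs, if_false]
          rw [← hnext, ih l (i + 1) hdrop]
          simp [pvCands, hs]

-- ===== VERDICT (by name: the statement is the Claim_ definition above) =====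
theorem find_separator_index_py_spec : Claim_equal_find_separator_index_py := by
  intro line _
  unfold Spec_find_separator_index_py find_separator_index_py find_separator_index_py_alt
  have h := pvMain line.toList line.toList 0 (by simp)
  simpa [pvEsc, pvLoopJ] using h
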